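-- pv_equiv track=rewrite | github.com/marcostrfn/bolsa | funciones/bolsa.py | get_operaciones_psar
-- ===== SOURCE A (Python) =====
-- def get_operaciones_psar(psarbear, psarbull, fecha, apertura, cierre):
-- 	operaciones=[]
-- 	for x in range(1,len(fecha)):
-- 		if psarbear[x]>0:
-- 			operaciones.append(('CORTO', fecha[x]))
-- 		else:
-- 			operaciones.append(('LARGO', fecha[x]))
-- 	x = 0
-- 	while True:
-- 		b1,c1 = operaciones[x]
-- 		b2,c2 = operaciones[x+1]
-- 		if b1 == b2: del operaciones[x+1]
-- 		else: x += 1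
-- 		if x == len(operaciones) - 1: break
--
-- 	return operaciones
-- ===== SOURCE B (Python) =====
-- def get_operaciones_psar(psarbear, psarbull, fecha, apertura, cierre):
--     ops = [('CORTO' if psarbear[x] > 0 else 'LARGO', fecha[x])
--            for x in range(1, len(fecha))]
--     return [ops[0]] + [cur for prev, cur in zip(ops, ops[1:]) if prev[0] != cur[0]]
-- ===== Notes on version B (the rewrite author's own statement) =====
-- stated objective: faster
-- what changed: Instead of building the full list and then repeatedly deleting consecutive duplicates with an O(n) del inside a while loop, B builds the labeled pairs once and returns the first pair plus the pairs whose label differs from their predecessor (zip of the list with its tail).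
import Mathlib
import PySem

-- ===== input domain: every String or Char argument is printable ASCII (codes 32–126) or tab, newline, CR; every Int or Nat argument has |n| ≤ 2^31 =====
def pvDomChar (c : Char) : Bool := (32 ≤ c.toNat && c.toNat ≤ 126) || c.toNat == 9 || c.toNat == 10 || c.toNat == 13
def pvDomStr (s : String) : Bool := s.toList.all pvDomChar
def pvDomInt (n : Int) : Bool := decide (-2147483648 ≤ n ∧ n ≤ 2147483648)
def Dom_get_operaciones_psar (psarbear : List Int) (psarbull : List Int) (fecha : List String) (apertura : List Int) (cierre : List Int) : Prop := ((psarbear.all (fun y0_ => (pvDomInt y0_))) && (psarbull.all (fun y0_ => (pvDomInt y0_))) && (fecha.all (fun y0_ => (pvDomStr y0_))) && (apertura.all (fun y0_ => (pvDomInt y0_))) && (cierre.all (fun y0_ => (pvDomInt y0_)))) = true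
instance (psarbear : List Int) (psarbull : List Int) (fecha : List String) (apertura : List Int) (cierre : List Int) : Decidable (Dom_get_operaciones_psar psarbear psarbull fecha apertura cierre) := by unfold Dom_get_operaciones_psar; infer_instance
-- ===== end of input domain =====

-- B replaces A's build-then-repeatedly-delete collapse of consecutive equal labels
-- by one pass: the first pair plus the pairs whose label differs from their
-- predecessor (zip of the built list with its tail).

-- ===== PORT A =====
-- the 'while True' loop of A: reads ops[x], ops[x+1] (IndexError outside the guard,
-- where Python raises and the port just returns); 'del operaciones[x+1]' = eraseIdx
def psarWhile (ops : List (String × String)) (x : Nat) : List (String × String) :=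
  if h : x + 1 < ops.length then
    if ops[x].1 = ops[x+1].1 then
      let ops' := ops.eraseIdx (x+1)
      if x = ops'.length - 1 then ops' else psarWhile ops' x
    else
      if x + 1 = ops.length - 1 then ops else psarWhile ops (x+1)
  else ops
termination_by ops.length - x
decreasing_by
  · simp only [List.length_eraseIdx, if_pos h]; omega
  · omega

def get_operaciones_psar (psarbear : List Int) (psarbull : List Int) (fecha : List String) (apertura : List Int) (cierre : List Int) : List (String × String) :=
  let operaciones := (PySem.List.pyRange 1 (fecha.length : Int) 1).foldl
    (fun acc x => acc ++ [(if 0 < PySem.List.pyGetD psarbear x 0 then "CORTO" else "LARGO",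
                           PySem.List.pyGetD fecha x "")]) []
  psarWhile operaciones 0

-- ===== PORT B =====
def get_operaciones_psar_alt (psarbear : List Int) (psarbull : List Int) (fecha : List String) (apertura : List Int) (cierre : List Int) : List (String × String) :=
  let ops := (PySem.List.pyRange 1 (fecha.length : Int) 1).map
    (fun x => (if 0 < PySem.List.pyGetD psarbear x 0 then "CORTO" else "LARGO",
               PySem.List.pyGetD fecha x ""))
  -- ops[0] raises IndexError in Python when ops is empty (outside Pre_); total here via getD
  [PySem.List.pyGetD ops 0 ("", "")] ++
    ((ops.zip ops.tail).filter (fun pc => pc.1.1 != pc.2.1)).map Prod.snd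

-- ===== PRECONDITION & SPEC =====
-- exactly where Python A returns: its while loop needs at least two built pairs
-- (len(fecha) >= 3) and the build loop indexes psarbear at 1 .. len(fecha)-1
def Pre_get_operaciones_psar (psarbear : List Int) (psarbull : List Int) (fecha : List String) (apertura : List Int) (cierre : List Int) : Prop :=
  3 ≤ fecha.length ∧ fecha.length ≤ psarbear.length
instance (psarbear : List Int) (psarbull : List Int) (fecha : List String) (apertura : List Int) (cierre : List Int) : Decidable (Pre_get_operaciones_psar psarbear psarbull fecha apertura cierre) := by unfold Pre_get_operaciones_psar; infer_instance

def pvWitness_get_operaciones_psar : List Int × List Int × List String × List Int × List Int :=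
  ([0, 2, -1, 3], [1], ["a", "b", "c", "d"], [2], [3])

def Spec_get_operaciones_psar (psarbear : List Int) (psarbull : List Int) (fecha : List String) (apertura : List Int) (cierre : List Int) (out : List (String × String)) : Prop := out = get_operaciones_psar_alt psarbear psarbull fecha apertura cierre
instance (psarbear : List Int) (psarbull : List Int) (fecha : List String) (apertura : List Int) (cierre : List Int) (out : List (String × String)) : Decidable (Spec_get_operaciones_psar psarbear psarbull fecha apertura cierre out) := by unfold Spec_get_operaciones_psar; infer_instance

-- ===== CLAIM (what is proved, stated in full; the proofs are below) =====
def Claim_equal_get_operaciones_psar : Prop := ∀ (psarbear : List Int) (psarbull : List Int) (fecha : List String) (apertura : List Int) (cierre : List Int), Dom_get_operaciones_psar psarbear psarbull fecha apertura cierre → Pre_get_operaciones_psar psarbear psarbull fecha apertura cierre → Spec_get_operaciones_psar psarbear psarbull fecha apertura cierre (get_operaciones_psar psarbear psarbull fecha apertura cierre)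


-- ===== LEMMAS AND PROOFS =====

-- collapse of runs of equal labels, keeping the first pair of each run
def ddp : List (String × String) → List (String × String)
  | [] => []
  | [a] => [a]
  | a :: b :: t => if a.1 = b.1 then ddp (a :: t) else a :: ddp (b :: t)
termination_by l => l.length
decreasing_by all_goals (simp; try omega)

-- the labels kept by B's zip comprehension after a pair with label p.1
def chg : (String × String) → List (String × String) → List (String × String)
  | _, [] => []
  | p, c :: t => if p.1 = c.1 then chg c t else c :: chg c t

lemma zip_filter_eq_chg (a : String × String) (l : List (String × String)) :
    (((a :: l).zip l).filter (fun pc => pc.1.1 != pc.2.1)).map Prod.snd = chg a l := by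
  induction l generalizing a with
  | nil => rfl
  | cons c t ih =>
    simp only [List.zip_cons_cons, List.filter_cons, chg]
    by_cases h : a.1 = c.1
    · simp [h, ih c]
    · simp [h, ih c]

lemma chg_congr (t : List (String × String)) (p q : String × String) (h : p.1 = q.1) :
    chg p t = chg q t := by
  cases t with
  | nil => rfl
  | cons c t' => simp only [chg, h]

lemma ddp_eq_cons_chg (l : List (String × String)) (a : String × String) :
    ddp (a :: l) = a :: chg a l := by
  induction l generalizing a with
  | nil => rw [ddp]; rfl
  | cons c t ih =>
    rw [ddp, chg]
    by_cases h : a.1 = c.1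
    · rw [if_pos h, if_pos h, ih a, chg_congr t a c h]
    · rw [if_neg h, if_neg h, ih c]

lemma psarWhile_pre (pre : List (String × String)) (a b : String × String) (t : List (String × String)) :
    psarWhile (pre ++ a :: b :: t) pre.length = pre ++ ddp (a :: b :: t) := by
  induction t generalizing pre a b with
  | nil =>
    rw [psarWhile]
    have h : pre.length + 1 < (pre ++ [a, b]).length := by simp
    rw [dif_pos h]
    have hga : (pre ++ [a, b])[pre.length] = a := by
      rw [List.getElem_append_right (le_refl _)]; simp
    have hgb : (pre ++ [a, b])[pre.length + 1] = b := by
      rw [List.getElem_append_right (by omega)]; simp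
    rw [hga, hgb]
    have herase : (pre ++ [a, b]).eraseIdx (pre.length + 1) = pre ++ [a] := by
      rw [List.eraseIdx_append_of_length_le (by omega)]; simp
    by_cases hab : a.1 = b.1
    · rw [if_pos hab]
      simp only [herase]
      rw [if_pos (by simp)]
      rw [ddp, if_pos hab, ddp]
    · rw [if_neg hab]
      rw [if_pos (by simp)]
      rw [ddp, if_neg hab, ddp]
  | cons c t' ih =>
    rw [psarWhile]
    have h : pre.length + 1 < (pre ++ a :: b :: c :: t').length := by simp
    rw [dif_pos h]
    have hga : (pre ++ a :: b :: c :: t')[pre.length] = a := by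
      rw [List.getElem_append_right (le_refl _)]; simp
    have hgb : (pre ++ a :: b :: c :: t')[pre.length + 1] = b := by
      rw [List.getElem_append_right (by omega)]; simp
    rw [hga, hgb]
    have herase : (pre ++ a :: b :: c :: t').eraseIdx (pre.length + 1) = pre ++ a :: c :: t' := by
      rw [List.eraseIdx_append_of_length_le (by omega)]; simp
    by_cases hab : a.1 = b.1
    · rw [if_pos hab]
      simp only [herase]
      rw [if_neg (by simp)]
      rw [ddp, if_pos hab]
      exact ih pre a c
    · rw [if_neg hab]
      rw [if_neg (by simp)]
      rw [ddp, if_neg hab]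
      have := ih (pre ++ [a]) b c
      simp only [List.append_assoc, List.singleton_append, List.length_append,
        List.length_singleton] at this ⊢
      exact this

-- ===== VERDICT (by name: the statement is the Claim_ definition above) =====
theorem get_operaciones_psar_spec : Claim_equal_get_operaciones_psar := by
  intro pb pbl f ap ci _ hpre
  unfold Pre_get_operaciones_psar at hpre
  unfold Spec_get_operaciones_psar
  obtain ⟨h3, -⟩ := hpre
  unfold get_operaciones_psar get_operaciones_psar_alt
  have hn1 : (1:Int) < (f.length : Int) := by omega
  have hr : PySem.List.pyRange 1 (f.length : Int) 1
      = 1 :: 2 :: PySem.List.pyRange 3 (f.length : Int) 1 := by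
    rw [PySem.List.pyRange_one_cons hn1, PySem.List.pyRange_one_cons (by omega : (1:Int)+1 < (f.length:Int))]
    norm_num
  rw [hr]
  rw [PySem.List.foldl_append_singleton_eq_map (fun x =>
    (if 0 < PySem.List.pyGetD pb x 0 then "CORTO" else "LARGO", PySem.List.pyGetD f x ""))]
  simp only [List.map_cons, List.nil_append, List.tail_cons, PySem.List.pyGetD_zero_cons,
    List.singleton_append]
  rw [zip_filter_eq_chg, ← ddp_eq_cons_chg]
  have hA := psarWhile_pre []
    (if 0 < PySem.List.pyGetD pb 1 0 then "CORTO" else "LARGO", PySem.List.pyGetD f 1 "")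
    (if 0 < PySem.List.pyGetD pb 2 0 then "CORTO" else "LARGO", PySem.List.pyGetD f 2 "")
    ((PySem.List.pyRange 3 (f.length : Int) 1).map (fun x =>
      (if 0 < PySem.List.pyGetD pb x 0 then "CORTO" else "LARGO", PySem.List.pyGetD f x "")))
  simpa using hA
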